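-- pv_equiv track=rewrite | github.com/lgraham076/100PythonProject | Text/reversestring.py | reverse_word
-- ===== SOURCE A (Python) =====
-- def reverse_word(word,beg,end):
-- 	tmp_word=list(word)
-- 	#Word is reversed when indexes cross each other in middle
-- 	if beg > end:
-- 		return tmp_word
--
-- 	#Switch letters
-- 	tmp_end = word[end]
-- 	tmp_word[end] = tmp_word[beg]
-- 	tmp_word[beg] = tmp_end
--
-- 	#Progress indexes
-- 	beg += 1
-- 	end -= 1
--
-- 	return reverse_word(tmp_word,beg,end)
-- ===== SOURCE B (Python) =====
-- def reverse_word(word, beg, end):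
--     chars = list(word)
--     if beg > end:
--         return chars
--     n = len(chars)
--     b = beg + n if beg < 0 else beg
--     e = end + n if end < 0 else end
--     return chars[:b] + chars[b:e+1][::-1] + chars[e+1:]
-- ===== Notes on version B (the rewrite author's own statement) =====
-- stated objective: faster
-- what changed: A reverses by recursing once per swap and copying the whole list at every level; B does no recursion at all and builds the result in one pass as prefix + reversed middle slice + suffix (normalizing negative indices the Python way).
-- outside the precondition, e.g. on reverse_word('abcd', -4, 3): A returns ['a', 'b', 'c', 'd'], B returns ['d', 'c', 'b', 'a']
import Mathlib
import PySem

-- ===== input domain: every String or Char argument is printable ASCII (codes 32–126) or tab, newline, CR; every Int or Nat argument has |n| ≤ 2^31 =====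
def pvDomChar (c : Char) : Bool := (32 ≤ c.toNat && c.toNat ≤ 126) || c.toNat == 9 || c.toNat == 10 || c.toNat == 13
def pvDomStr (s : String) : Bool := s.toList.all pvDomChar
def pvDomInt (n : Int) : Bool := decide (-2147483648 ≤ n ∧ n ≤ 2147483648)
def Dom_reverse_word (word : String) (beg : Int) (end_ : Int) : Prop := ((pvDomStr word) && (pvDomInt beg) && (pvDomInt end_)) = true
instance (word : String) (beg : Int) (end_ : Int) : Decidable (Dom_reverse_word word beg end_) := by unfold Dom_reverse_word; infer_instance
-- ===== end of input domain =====

-- B replaces A's copy-per-swap recursion by a single prefix ++ reversed-slice ++ suffix pass (faster; A raises on out-of-range indices, excluded by Pre_).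


-- ===== PORT A =====
-- A's recursion: first call gets a string, later calls get the list; we model both levels
-- uniformly as the recursion on the list of one-character strings that list(word) produces.
def pvRevA {α : Type} (w : List α) (beg : Int) (end_ : Int) : List α :=
  if beg > end_ then w
  else
    match PySem.List.pyGet? w end_, PySem.List.pyGet? w beg with
    | some tmp_end, some wb =>
        -- tmp_word[end] = tmp_word[beg]; tmp_word[beg] = tmp_end
        pvRevA (PySem.List.pySetD (PySem.List.pySetD w end_ wb) beg tmp_end) (beg + 1) (end_ - 1)
    | _, _ => w   -- IndexError (excluded by Pre_)
  termination_by (end_ + 1 - beg).toNat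
  decreasing_by omega

def reverse_word (word : String) (beg : Int) (end_ : Int) : List String :=
  pvRevA (word.toList.map (fun c => String.singleton c)) beg end_

-- ===== PORT B =====
def reverse_word_alt (word : String) (beg : Int) (end_ : Int) : List String :=
  let chars := word.toList.map (fun c => String.singleton c)
  if beg > end_ then chars
  else
    let n : Int := PySem.List.len chars
    let b : Int := if beg < 0 then beg + n else beg
    let e : Int := if end_ < 0 then end_ + n else end_
    PySem.List.slice chars none (some b)
      ++ (PySem.List.slice chars (some b) (some (e + 1))).reverse
      ++ PySem.List.slice chars (some (e + 1)) none

-- ===== PRECONDITION & SPEC =====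
-- Pre_ excludes beg ≤ end_ with a negative or out-of-range index: out of range A raises
-- IndexError, and for negative in-range indices A's result is an artefact of where its raw
-- (sign-mixed) indices happen to cross during the wraparound recursion, while B normalizes
-- negative indices the way Python indexing does.
def Pre_reverse_word (word : String) (beg : Int) (end_ : Int) : Prop :=
  beg > end_ ∨ (0 ≤ beg ∧ beg ≤ end_ ∧ end_ < (word.toList.length : Int))
instance (word : String) (beg : Int) (end_ : Int) : Decidable (Pre_reverse_word word beg end_) := by unfold Pre_reverse_word; infer_instance

def pvWitness_reverse_word : String × Int × Int := ("swap me", 1, 5)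

def Spec_reverse_word (word : String) (beg : Int) (end_ : Int) (out : List String) : Prop := out = reverse_word_alt word beg end_
instance (word : String) (beg : Int) (end_ : Int) (out : List String) : Decidable (Spec_reverse_word word beg end_ out) := by unfold Spec_reverse_word; infer_instance

-- ===== CLAIM (what is proved, stated in full; the proofs are below) =====
def Claim_equal_reverse_word : Prop := ∀ (word : String) (beg : Int) (end_ : Int), Dom_reverse_word word beg end_ → Pre_reverse_word word beg end_ → Spec_reverse_word word beg end_ (reverse_word word beg end_)

-- ===== LEMMAS AND PROOFS =====

-- both assignments keep the list length
theorem set2_getElem? {α : Type} (w : List α) (b e : Nat) (hb : b < w.length) (he : e < w.length) (j : Nat) :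
    ((w.set e w[b]).set b w[e])[j]? = if j = b then w[e]? else if j = e then w[b]? else w[j]? := by
  by_cases hjb : j = b
  · subst hjb
    simp [hb, he]
  · rw [List.getElem?_set_ne (by omega)]
    by_cases hje : j = e
    · subst hje; simp [hjb, hb, he]
    · rw [List.getElem?_set_ne (by omega)]; simp [hjb, hje]

-- Pointwise characterisation of A's recursion on in-range non-negative indices.
theorem pvRevA_getElem? {α : Type} (d : Nat) : ∀ (w : List α) (b e : Nat), e - b = d → b ≤ e → e < w.length → ∀ i : Nat,
    (pvRevA w (b:Int) (e:Int))[i]? = if b ≤ i ∧ i ≤ e then w[b + e - i]? else w[i]? := by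
  induction d using Nat.strong_induction_on with
  | _ d ih =>
    intro w b e hd hbe he i
    have hb : b < w.length := by omega
    rw [pvRevA, if_neg (by omega)]
    have hge : PySem.List.pyGet? w (e:Int) = some w[e] := by
      simp [PySem.List.pyGet?_natCast, List.getElem?_eq_getElem he]
    have hgb : PySem.List.pyGet? w (b:Int) = some w[b] := by
      simp [PySem.List.pyGet?_natCast, List.getElem?_eq_getElem hb]
    rw [hge, hgb]
    simp only [PySem.List.pySetD_natCast]
    by_cases h2 : b + 2 ≤ e
    · have c1 : ((b:Int) + 1) = ((b+1 : Nat) : Int) := by omega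
      have c2 : ((e:Int) - 1) = ((e-1 : Nat) : Int) := by omega
      rw [c1, c2, ih (d-2) (by omega) _ (b+1) (e-1) (by omega) (by omega) (by simp; omega)]
      simp only [set2_getElem? w b e hb he]
      split_ifs <;> first
        | rfl
        | omega
        | (have : (b+1) + (e-1) - i = b + e - i := by omega
           rw [this])
        | (have : b + e - i = b := by omega
           rw [this])
        | (have : b + e - i = e := by omega
           rw [this])
    · rw [pvRevA, if_pos (by omega), set2_getElem? w b e hb he i]
      split_ifs <;> first
        | rfl
        | omega
        | (have : b + e - i = e := by omega
           rw [this])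
        | (have : b + e - i = b := by omega
           rw [this])

-- Pointwise characterisation of B's prefix ++ reversed-slice ++ suffix result.
theorem sliceRev_getElem? {α : Type} (L : List α) (b e : Nat) (hbe : b ≤ e) (he : e < L.length) (i : Nat) :
    (L.take b ++ ((L.drop b).take (e+1-b)).reverse ++ L.drop (e+1))[i]? =
      if b ≤ i ∧ i ≤ e then L[b + e - i]? else L[i]? := by
  have hlt : (L.take b).length = b := by simp; omega
  have hlm : (((L.drop b).take (e+1-b)).reverse).length = e + 1 - b := by simp; omega
  rw [List.append_assoc]
  by_cases hib : i < b
  · rw [List.getElem?_append_left (by omega), List.getElem?_take_of_lt hib, if_neg (by omega)]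
  · by_cases hie : i ≤ e
    · rw [List.getElem?_append_right (by omega), List.getElem?_append_left (by omega),
        List.getElem?_reverse (by simp; omega), if_pos (by omega)]
      have h1 : ((L.drop b).take (e+1-b)).length = e + 1 - b := by simp; omega
      rw [h1, List.getElem?_take_of_lt (by omega), List.getElem?_drop]
      have : b + (e + 1 - b - 1 - (i - (L.take b).length)) = b + e - i := by omega
      rw [this]
    · rw [List.getElem?_append_right (by omega), List.getElem?_append_right (by omega),
        List.getElem?_drop, if_neg (by omega)]
      have : e + 1 + (i - (L.take b).length - (((L.drop b).take (e+1-b)).reverse).length) = i := by omega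
      rw [this]

theorem reverse_word_spec : Claim_equal_reverse_word := by
  intro word beg end_ _ hpre
  unfold Spec_reverse_word reverse_word reverse_word_alt
  set L : List String := word.toList.map (fun c => String.singleton c) with hLdef
  rcases hpre with hgt | ⟨h0, hbe, hlt⟩
  · rw [pvRevA, if_pos hgt]
    simp only [if_pos hgt]
  · have hng : ¬ beg > end_ := by omega
    have hL : (L.length : Int) = (word.toList.length : Int) := by simp [hLdef]
    set b : Nat := beg.toNat with hbdef
    set e : Nat := end_.toNat with hedef
    have hbeg : beg = (b : Int) := by omega
    have hend : end_ = (e : Int) := by omega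
    have heL : e < L.length := by simp only [hLdef, List.length_map]; omega
    simp only [if_neg hng, if_neg (show ¬ beg < 0 by omega), if_neg (show ¬ end_ < 0 by omega)]
    rw [PySem.List.slice_to L h0, PySem.List.slice_toNat L h0 (by omega), PySem.List.slice_from L (by omega)]
    have h1 : (end_ + 1).toNat = e + 1 := by omega
    rw [h1, hbeg, hend]
    apply List.ext_getElem?
    intro i
    rw [pvRevA_getElem? (e - b) L b e rfl (by omega) heL i]
    simp only [Int.toNat_natCast]
    rw [sliceRev_getElem? L b e (by omega) heL i]
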